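-- pv_equiv track=rewrite | github.com/nielrenned/aoc2024 | solutions/day21.py | get_all_shortest_paths
-- ===== SOURCE A (Python) =====
-- from queue import Queue
--
-- DIRECTIONS = [(0, -1), (1, 0), (0, 1), (-1, 0)]
--
-- def get_all_shortest_paths(p1, p2, keypad):
--     if p1 == p2: return [[]]
--
--     min_length = None
--     routes = []
--     w, h = len(keypad[0]), len(keypad)
--
--     q = Queue()
--     q.put(([p1], 0))
--     while not q.empty():
--         route, length = q.get()
--         if length == min_length: continue
--         for dx, dy in DIRECTIONS:
--             x, y = route[-1]
--             nx, ny = x + dx, y + dy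
--             if not (0 <= nx < w and 0 <= ny < h) or keypad[ny][nx] is None:
--                 continue
--             elif (nx, ny) in route:
--                 continue
--             elif (nx, ny) == p2:
--                 if min_length is None: min_length = length + 1
--                 routes.append(route + [p2])
--             else:
--                 q.put((route + [(nx, ny)], length + 1))
--     return routes
-- ===== SOURCE B (Python) =====
-- DIRECTIONS = [(0, -1), (1, 0), (0, 1), (-1, 0)]
--
-- def get_all_shortest_paths(p1, p2, keypad):
--     if p1 == p2: return [[]]
--     w, h = len(keypad[0]), len(keypad)
--
--     def extensions(route):
--         x, y = route[-1]
--         cand = [(x + dx, y + dy) for dx, dy in DIRECTIONS]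
--         return [(nx, ny) for nx, ny in cand
--                 if 0 <= nx < w and 0 <= ny < h
--                 and keypad[ny][nx] is not None and (nx, ny) not in route]
--
--     def dfs(route, depth):
--         if depth == 1:
--             return [route + [n] for n in extensions(route) if n == p2]
--         return [path for n in extensions(route) if n != p2
--                      for path in dfs(route + [n], depth - 1)]
--
--     for depth in range(1, w * h + 2):
--         found = dfs([p1], depth)
--         if found:
--             return found
--     return []
-- ===== Notes on version B (the rewrite author's own statement) =====
-- stated objective: alternative
-- what changed: A's single FIFO queue of partial routes with a min_length sentinel and skip-on-length logic is replaced by iterative deepening: a recursive depth-limited DFS enumerates all simple routes of exactly the candidate length for depth = 1, 2, ..., w*h+1, returning the first non-empty batch.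
import Mathlib
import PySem

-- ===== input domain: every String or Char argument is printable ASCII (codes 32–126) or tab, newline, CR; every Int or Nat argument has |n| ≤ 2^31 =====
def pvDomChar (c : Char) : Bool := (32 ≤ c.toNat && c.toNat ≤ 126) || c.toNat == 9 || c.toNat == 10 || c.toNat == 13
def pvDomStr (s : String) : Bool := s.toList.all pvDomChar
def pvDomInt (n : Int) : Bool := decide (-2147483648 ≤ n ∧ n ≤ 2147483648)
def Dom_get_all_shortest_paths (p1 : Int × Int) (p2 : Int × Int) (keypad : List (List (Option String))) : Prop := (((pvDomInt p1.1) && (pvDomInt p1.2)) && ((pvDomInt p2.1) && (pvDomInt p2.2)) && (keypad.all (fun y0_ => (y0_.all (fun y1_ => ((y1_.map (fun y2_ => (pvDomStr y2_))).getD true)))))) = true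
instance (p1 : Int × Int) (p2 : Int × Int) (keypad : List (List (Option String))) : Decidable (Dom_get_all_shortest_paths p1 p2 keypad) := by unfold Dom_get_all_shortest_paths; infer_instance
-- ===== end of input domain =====

-- B replaces A's single FIFO queue with min_length sentinel by iterative deepening
-- (a depth-limited DFS per candidate length); objective: alternative structure, same values.

-- ===== PORT A =====
-- DIRECTIONS = [(0, -1), (1, 0), (0, 1), (-1, 0)]  (module constant, shared by both Pythons)
def pvDIRECTIONS : List (Int × Int) := [(0, -1), (1, 0), (0, 1), (-1, 0)]

-- the inner `for dx, dy in DIRECTIONS` loop of A: threads (queue, min_length, routes);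
-- `keypad[ny][nx]` via pyGet?; `route[-1]` via getLastD (route is never empty when A runs this)
def aProcDirs (p2 : Int × Int) (keypad : List (List (Option String))) (w h : Int)
    (route : List (Int × Int)) (length : Int) :
    List (Int × Int) → List (List (Int × Int) × Int) → Option Int → List (List (Int × Int)) →
    List (List (Int × Int) × Int) × Option Int × List (List (Int × Int))
  | [], q, ml, routes => (q, ml, routes)
  | (dx, dy) :: ds, q, ml, routes =>
    let xy := route.getLastD (0, 0)
    let nx := xy.1 + dx
    let ny := xy.2 + dy
    if ¬(0 ≤ nx ∧ nx < w ∧ 0 ≤ ny ∧ ny < h) ∨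
        ((PySem.List.pyGet? keypad ny).bind (fun row => PySem.List.pyGet? row nx)) = some none then
      aProcDirs p2 keypad w h route length ds q ml routes
    else if (nx, ny) ∈ route then
      aProcDirs p2 keypad w h route length ds q ml routes
    else if (nx, ny) = p2 then
      aProcDirs p2 keypad w h route length ds q
        (if ml = none then some (length + 1) else ml) (routes ++ [route ++ [p2]])
    else
      aProcDirs p2 keypad w h route length ds (q ++ [(route ++ [(nx, ny)], length + 1)]) ml routes

-- the `while not q.empty()` loop; fuel is only a termination guard (proven sufficient below)
def aLoop (p2 : Int × Int) (keypad : List (List (Option String))) (w h : Int) :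
    Nat → List (List (Int × Int) × Int) → Option Int → List (List (Int × Int)) →
    List (List (Int × Int))
  | 0, _, _, routes => routes
  | _ + 1, [], _, routes => routes
  | fuel + 1, (route, length) :: rest, ml, routes =>
    if ml = some length then aLoop p2 keypad w h fuel rest ml routes
    else
      let s := aProcDirs p2 keypad w h route length pvDIRECTIONS rest ml routes
      aLoop p2 keypad w h fuel s.1 s.2.1 s.2.2

def get_all_shortest_paths (p1 : Int × Int) (p2 : Int × Int) (keypad : List (List (Option String))) : List (List (Int × Int)) :=
  if p1 = p2 then [[]]
  else
    let w : Int := (keypad.headD []).length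
    let h : Int := keypad.length
    aLoop p2 keypad w h (5 ^ ((w * h).toNat + 2)) [([p1], 0)] none []

-- ===== PORT B =====
-- Source B: `extensions(route)` — candidates in DIRECTIONS order, then the validity filter
def bExtensions (keypad : List (List (Option String))) (w h : Int)
    (route : List (Int × Int)) : List (Int × Int) :=
  let xy := route.getLastD (0, 0)
  (pvDIRECTIONS.map (fun d => (xy.1 + d.1, xy.2 + d.2))).filter
    (fun n => decide ((0 ≤ n.1 ∧ n.1 < w ∧ 0 ≤ n.2 ∧ n.2 < h) ∧
      ¬(((PySem.List.pyGet? keypad n.2).bind (fun row => PySem.List.pyGet? row n.1)) = some none) ∧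
      n ∉ route))

-- Source B: `dfs(route, depth)`; depth 0 is never reached (the driver starts at depth 1)
def bDfs (p2 : Int × Int) (keypad : List (List (Option String))) (w h : Int) :
    List (Int × Int) → Nat → List (List (Int × Int))
  | _, 0 => []
  | route, 1 =>
    ((bExtensions keypad w h route).filter (fun n => decide (n = p2))).map
      (fun n => route ++ [n])
  | route, d + 2 =>
    ((bExtensions keypad w h route).filter (fun n => decide (¬n = p2))).flatMap
      (fun n => bDfs p2 keypad w h (route ++ [n]) (d + 1))

-- Source B: `for depth in range(1, w*h + 2): …` with early return; n counts remaining depths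
def bTry (p1 p2 : Int × Int) (keypad : List (List (Option String))) (w h : Int) :
    Nat → Nat → List (List (Int × Int))
  | 0, _ => []
  | n + 1, depth =>
    let found := bDfs p2 keypad w h [p1] depth
    if found ≠ [] then found else bTry p1 p2 keypad w h n (depth + 1)

def get_all_shortest_paths_alt (p1 : Int × Int) (p2 : Int × Int) (keypad : List (List (Option String))) : List (List (Int × Int)) :=
  if p1 = p2 then [[]]
  else
    let w : Int := (keypad.headD []).length
    let h : Int := keypad.length
    bTry p1 p2 keypad w h ((w * h).toNat + 1) 1

-- ===== PRECONDITION & SPEC =====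
-- Pre_ excludes exactly the inputs on which Python A can hit an IndexError (`keypad[0]` on an
-- empty keypad, or `keypad[ny][nx]` on a row shorter than the first row).  A keypad whose rows
-- all reach the width of the first row never raises; a ragged keypad is also safe when every
-- neighbour of p1 is out of bounds, since then no cell is ever probed.  Pre_ is slightly
-- narrower than A's exact return set: on some other ragged keypads the short cells happen to be
-- unreachable and A still returns (see claim.json "cites").
def Pre_get_all_shortest_paths (p1 : Int × Int) (p2 : Int × Int) (keypad : List (List (Option String))) : Prop :=
  p1 = p2 ∨
  (keypad ≠ [] ∧
    ((∀ row ∈ keypad, (keypad.headD []).length ≤ row.length) ∨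
     (∀ d ∈ pvDIRECTIONS,
        ¬(0 ≤ p1.1 + d.1 ∧ p1.1 + d.1 < ((keypad.headD []).length : Int) ∧
          0 ≤ p1.2 + d.2 ∧ p1.2 + d.2 < (keypad.length : Int)))))
instance (p1 : Int × Int) (p2 : Int × Int) (keypad : List (List (Option String))) : Decidable (Pre_get_all_shortest_paths p1 p2 keypad) := by unfold Pre_get_all_shortest_paths; infer_instance

def pvWitness_get_all_shortest_paths : (Int × Int) × (Int × Int) × List (List (Option String)) :=
  ((0, 0), (1, 0), [[some "a", some "b"], [some "c", none]])

def Spec_get_all_shortest_paths (p1 : Int × Int) (p2 : Int × Int) (keypad : List (List (Option String))) (out : List (List (Int × Int))) : Prop := out = get_all_shortest_paths_alt p1 p2 keypad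
instance (p1 : Int × Int) (p2 : Int × Int) (keypad : List (List (Option String))) (out : List (List (Int × Int))) : Decidable (Spec_get_all_shortest_paths p1 p2 keypad out) := by unfold Spec_get_all_shortest_paths; infer_instance

-- ===== CLAIM (what is proved, stated in full; the proofs are below) =====
def Claim_equal_get_all_shortest_paths : Prop := ∀ (p1 : Int × Int) (p2 : Int × Int) (keypad : List (List (Option String))), Dom_get_all_shortest_paths p1 p2 keypad → Pre_get_all_shortest_paths p1 p2 keypad → Spec_get_all_shortest_paths p1 p2 keypad (get_all_shortest_paths p1 p2 keypad)

-- ===== LEMMAS AND PROOFS =====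

-- ---- generic building blocks over an arbitrary direction list ----
def pvExtOf (keypad : List (List (Option String))) (w h : Int)
    (route : List (Int × Int)) (ds : List (Int × Int)) : List (Int × Int) :=
  let xy := route.getLastD (0, 0)
  (ds.map (fun d => (xy.1 + d.1, xy.2 + d.2))).filter
    (fun n => decide ((0 ≤ n.1 ∧ n.1 < w ∧ 0 ≤ n.2 ∧ n.2 < h) ∧
      ¬(((PySem.List.pyGet? keypad n.2).bind (fun row => PySem.List.pyGet? row n.1)) = some none) ∧
      n ∉ route))

theorem bExtensions_eq_extOf (keypad : List (List (Option String))) (w h : Int)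
    (route : List (Int × Int)) :
    bExtensions keypad w h route = pvExtOf keypad w h route pvDIRECTIONS := rfl

def pvHb (p2 : Int × Int) (keypad : List (List (Option String))) (w h : Int)
    (r : List (Int × Int)) : List (List (Int × Int)) :=
  ((bExtensions keypad w h r).filter (fun n => decide (n = p2))).map (fun n => r ++ [n])

def pvEb (p2 : Int × Int) (keypad : List (List (Option String))) (w h : Int)
    (r : List (Int × Int)) : List (List (Int × Int)) :=
  ((bExtensions keypad w h r).filter (fun n => decide (¬n = p2))).map (fun n => r ++ [n])

def pvH (p2 : Int × Int) (keypad : List (List (Option String))) (w h : Int)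
    (F : List (List (Int × Int))) : List (List (Int × Int)) :=
  F.flatMap (pvHb p2 keypad w h)

def pvE (p2 : Int × Int) (keypad : List (List (Option String))) (w h : Int)
    (F : List (List (Int × Int))) : List (List (Int × Int)) :=
  F.flatMap (pvEb p2 keypad w h)

def pvBres (p2 : Int × Int) (keypad : List (List (Option String))) (w h : Int) :
    List (List (Int × Int)) → Nat → List (List (Int × Int))
  | _, 0 => []
  | F, n + 1 =>
    if pvH p2 keypad w h F ≠ [] then pvH p2 keypad w h F
    else pvBres p2 keypad w h (pvE p2 keypad w h F) n

def pvEpow (p2 : Int × Int) (keypad : List (List (Option String))) (w h : Int) :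
    Nat → List (List (Int × Int)) → List (List (Int × Int))
  | 0, F => F
  | d + 1, F => pvEpow p2 keypad w h d (pvE p2 keypad w h F)

-- ---- characterisation of A's inner direction loop ----
theorem procDirs_eq (p2 : Int × Int) (keypad : List (List (Option String))) (w h : Int)
    (route : List (Int × Int)) (len : Int) :
    ∀ (ds : List (Int × Int)) (q : List (List (Int × Int) × Int)) (ml : Option Int)
      (routes : List (List (Int × Int))),
    aProcDirs p2 keypad w h route len ds q ml routes =
      (q ++ ((pvExtOf keypad w h route ds).filter (fun n => decide (¬n = p2))).map
          (fun n => (route ++ [n], len + 1)),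
       (if ml = none ∧ ((pvExtOf keypad w h route ds).filter (fun n => decide (n = p2))) ≠ []
        then some (len + 1) else ml),
       routes ++ ((pvExtOf keypad w h route ds).filter (fun n => decide (n = p2))).map
          (fun n => route ++ [n])) := by
  intro ds
  induction ds with
  | nil => intro q ml routes; simp [aProcDirs, pvExtOf]
  | cons d ds ih =>
    intro q ml routes
    obtain ⟨dx, dy⟩ := d
    by_cases h1 : ¬(0 ≤ (route.getLastD (0, 0)).1 + dx ∧ (route.getLastD (0, 0)).1 + dx < w ∧
          0 ≤ (route.getLastD (0, 0)).2 + dy ∧ (route.getLastD (0, 0)).2 + dy < h) ∨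
        ((PySem.List.pyGet? keypad ((route.getLastD (0, 0)).2 + dy)).bind
          (fun row => PySem.List.pyGet? row ((route.getLastD (0, 0)).1 + dx))) = some none
    · have hstep : aProcDirs p2 keypad w h route len ((dx, dy) :: ds) q ml routes
          = aProcDirs p2 keypad w h route len ds q ml routes := by
        simp only [aProcDirs]
        rw [if_pos h1]
      have hext : pvExtOf keypad w h route ((dx, dy) :: ds) = pvExtOf keypad w h route ds := by
        simp only [pvExtOf, List.map_cons, List.filter_cons]
        rw [if_neg]
        simp only [decide_eq_true_eq]
        tauto
      rw [hstep, ih, hext]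
    · by_cases h2 : ((route.getLastD (0, 0)).1 + dx, (route.getLastD (0, 0)).2 + dy) ∈ route
      · have hstep : aProcDirs p2 keypad w h route len ((dx, dy) :: ds) q ml routes
            = aProcDirs p2 keypad w h route len ds q ml routes := by
          simp only [aProcDirs]
          rw [if_neg h1, if_pos h2]
        have hext : pvExtOf keypad w h route ((dx, dy) :: ds) = pvExtOf keypad w h route ds := by
          simp only [pvExtOf, List.map_cons, List.filter_cons]
          rw [if_neg]
          simp only [decide_eq_true_eq]
          tauto
        rw [hstep, ih, hext]
      · push Not at h1
        have hext : pvExtOf keypad w h route ((dx, dy) :: ds)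
            = ((route.getLastD (0, 0)).1 + dx, (route.getLastD (0, 0)).2 + dy) ::
              pvExtOf keypad w h route ds := by
          simp only [pvExtOf, List.map_cons, List.filter_cons]
          rw [if_pos]
          simp only [decide_eq_true_eq]
          exact ⟨h1.1, h1.2, h2⟩
        by_cases h3 : ((route.getLastD (0, 0)).1 + dx, (route.getLastD (0, 0)).2 + dy) = p2
        · have hstep : aProcDirs p2 keypad w h route len ((dx, dy) :: ds) q ml routes
              = aProcDirs p2 keypad w h route len ds q
                (if ml = none then some (len + 1) else ml) (routes ++ [route ++ [p2]]) := by
            simp only [aProcDirs]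
            rw [if_neg (by tauto), if_neg h2, if_pos h3]
          rw [hstep, ih, hext, h3]
          cases ml with
          | none => simp
          | some m => simp
        · have hstep : aProcDirs p2 keypad w h route len ((dx, dy) :: ds) q ml routes
              = aProcDirs p2 keypad w h route len ds
                (q ++ [(route ++ [((route.getLastD (0, 0)).1 + dx,
                    (route.getLastD (0, 0)).2 + dy)], len + 1)]) ml routes := by
            simp only [aProcDirs]
            rw [if_neg (by tauto), if_neg h2, if_neg h3]
          rw [hstep, ih, hext]
          simp only [List.filter_cons, decide_eq_true_eq]
          rw [if_neg h3, if_pos h3]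
          simp

-- ---- the route invariant and the length bound ----
def pvInb (w h : Int) (n : Int × Int) : Prop :=
  0 ≤ n.1 ∧ n.1 < w ∧ 0 ≤ n.2 ∧ n.2 < h

def pvRouteOK (p1 : Int × Int) (w h : Int) (r : List (Int × Int)) : Prop :=
  ∃ t, r = p1 :: t ∧ t.Nodup ∧ p1 ∉ t ∧ ∀ c ∈ t, pvInb w h c

theorem pvRouteOK_length (p1 : Int × Int) (w h : Int) (r : List (Int × Int))
    (hr : pvRouteOK p1 w h r) : r.length ≤ w.toNat * h.toNat + 1 := by
  obtain ⟨t, rfl, hnd, hp1, hin⟩ := hr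
  simp only [List.length_cons]
  have hsub : t ⊆ ((Finset.range w.toNat ×ˢ Finset.range h.toNat).image
      (fun p : Nat × Nat => ((p.1 : Int), (p.2 : Int)))).toList := by
    intro c hc
    have hc' := hin c hc
    obtain ⟨h1, h2, h3, h4⟩ := hc'
    rw [Finset.mem_toList, Finset.mem_image]
    refine ⟨(c.1.toNat, c.2.toNat), ?_, ?_⟩
    · rw [Finset.mem_product]
      constructor <;> simp [Finset.mem_range] <;> omega
    · have e1 : ((c.1.toNat : Int)) = c.1 := Int.toNat_of_nonneg h1
      have e2 : ((c.2.toNat : Int)) = c.2 := Int.toNat_of_nonneg h3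
      simp [e1, e2]
  have hlen : t.length ≤ ((Finset.range w.toNat ×ˢ Finset.range h.toNat).image
      (fun p : Nat × Nat => ((p.1 : Int), (p.2 : Int)))).toList.length :=
    List.Subperm.length_le (List.subperm_of_subset hnd hsub)
  have hcard : ((Finset.range w.toNat ×ˢ Finset.range h.toNat).image
      (fun p : Nat × Nat => ((p.1 : Int), (p.2 : Int)))).toList.length ≤ w.toNat * h.toNat := by
    rw [Finset.length_toList]
    calc _ ≤ (Finset.range w.toNat ×ˢ Finset.range h.toNat).card := Finset.card_image_le
    _ = w.toNat * h.toNat := by simp [Finset.card_product]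
  omega

theorem mem_bExtensions (keypad : List (List (Option String))) (w h : Int)
    (r : List (Int × Int)) (n : Int × Int) (hn : n ∈ bExtensions keypad w h r) :
    pvInb w h n ∧ n ∉ r := by
  have h := List.mem_filter.mp hn
  have h2 := of_decide_eq_true h.2
  exact ⟨h2.1, h2.2.2⟩

theorem pvRouteOK_child (p1 : Int × Int) (keypad : List (List (Option String))) (w h : Int)
    (r : List (Int × Int)) (n : Int × Int) (hr : pvRouteOK p1 w h r)
    (hn : n ∈ bExtensions keypad w h r) : pvRouteOK p1 w h (r ++ [n]) := by
  obtain ⟨t, rfl, hnd, hp1, hin⟩ := hr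
  obtain ⟨hinb, hmem⟩ := mem_bExtensions keypad w h _ n hn
  refine ⟨t ++ [n], by simp, ?_, ?_, ?_⟩
  · rw [List.nodup_append]
    refine ⟨hnd, by simp, ?_⟩
    intro a ha b hb
    rw [List.mem_singleton] at hb
    subst hb
    intro e
    subst e
    exact hmem (List.mem_cons_of_mem _ ha)
  · intro hc
    rcases List.mem_append.mp hc with hc | hc
    · exact hp1 hc
    · simp at hc
      subst hc
      exact hmem (by simp)
  · intro c hc
    rcases List.mem_append.mp hc with hc | hc
    · exact hin c hc
    · simp at hc
      subst hc
      exact hinb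

def pvFrontOK (p1 : Int × Int) (w h : Int) (k : Nat) (F : List (List (Int × Int))) : Prop :=
  ∀ r ∈ F, pvRouteOK p1 w h r ∧ r.length = k + 1

-- ---- the fuel measure ----
def pvMu (wh : Nat) (F : List (List (Int × Int))) : Nat :=
  (F.map (fun r => 5 ^ (wh + 2 - r.length))).sum

theorem pvEb_length_le (p2 : Int × Int) (keypad : List (List (Option String))) (w h : Int)
    (r : List (Int × Int)) : (pvEb p2 keypad w h r).length ≤ 4 := by
  have h1 : (bExtensions keypad w h r).length ≤ 4 := by
    unfold bExtensions
    dsimp only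
    exact le_trans (List.length_filter_le _ _) (by simp [pvDIRECTIONS])
  unfold pvEb
  rw [List.length_map]
  exact le_trans (List.length_filter_le _ _) h1

theorem pvMu_ge (wh : Nat) (F : List (List (Int × Int))) (c : Nat)
    (hc : ∀ r ∈ F, c ≤ 5 ^ (wh + 2 - r.length)) : c * F.length ≤ pvMu wh F := by
  induction F with
  | nil => simp [pvMu]
  | cons r F ih =>
    have h1 := hc r (by simp)
    have h2 := ih (fun r hr => hc r (by simp [hr]))
    simp only [pvMu, List.map_cons, List.sum_cons, List.length_cons] at *
    nlinarith

theorem pvMu_le (wh : Nat) (F : List (List (Int × Int))) (c : Nat)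
    (hc : ∀ r ∈ F, 5 ^ (wh + 2 - r.length) ≤ c) : pvMu wh F ≤ c * F.length := by
  induction F with
  | nil => simp [pvMu]
  | cons r F ih =>
    have h1 := hc r (by simp)
    have h2 := ih (fun r hr => hc r (by simp [hr]))
    simp only [pvMu, List.map_cons, List.sum_cons, List.length_cons] at *
    nlinarith

-- ---- the min_length ≠ None phase of A's while loop ----
theorem aLoop_some (p2 : Int × Int) (keypad : List (List (Option String))) (w h : Int)
    (k : Int) :
    ∀ (fuel : Nat) (F₁ F₂ : List (List (Int × Int))) (routes : List (List (Int × Int))),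
    5 * F₁.length + F₂.length ≤ fuel →
    aLoop p2 keypad w h fuel
        (F₁.map (fun r => (r, k)) ++ F₂.map (fun r => (r, k + 1))) (some (k + 1)) routes
      = routes ++ pvH p2 keypad w h F₁ := by
  intro fuel
  induction fuel with
  | zero =>
    intro F₁ F₂ routes hle
    have h1 : F₁ = [] := by cases F₁ <;> simp_all
    have h2 : F₂ = [] := by cases F₂ <;> simp_all
    subst h1; subst h2
    simp [aLoop, pvH]
  | succ fuel ih =>
    intro F₁ F₂ routes hle
    match F₁ with
    | [] =>
      match F₂ with
      | [] => simp [aLoop, pvH]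
      | r :: F₂ =>
        simp only [List.map_cons, List.map_nil, List.nil_append, aLoop]
        rw [if_pos trivial]
        have := ih [] F₂ routes (by simp at hle ⊢; omega)
        simpa using this
    | r :: F₁ =>
      simp only [List.map_cons, List.cons_append, aLoop]
      rw [if_neg (by intro hc; injection hc with hc; omega)]
      rw [procDirs_eq]
      have hq : (F₁.map (fun r => (r, k)) ++ F₂.map (fun r => (r, k + 1))) ++
          ((pvExtOf keypad w h r pvDIRECTIONS).filter (fun n => decide (¬n = p2))).map
            (fun n => (r ++ [n], k + 1))
          = F₁.map (fun r => (r, k)) ++ (F₂ ++ pvEb p2 keypad w h r).map (fun r => (r, k + 1)) := by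
        rw [List.append_assoc, List.map_append]
        congr 1
        unfold pvEb
        rw [bExtensions_eq_extOf, List.map_map]
        rfl
      have hml : (if some (k + 1) = none ∧
            ((pvExtOf keypad w h r pvDIRECTIONS).filter (fun n => decide (n = p2))) ≠ []
          then some (k + 1) else some (k + 1)) = some (k + 1) := by
        split <;> rfl
      have hroutes : routes ++ ((pvExtOf keypad w h r pvDIRECTIONS).filter
            (fun n => decide (n = p2))).map (fun n => r ++ [n])
          = routes ++ pvHb p2 keypad w h r := by
        unfold pvHb
        rw [bExtensions_eq_extOf]
      simp only [hq, hml, hroutes]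
      have hlen : (pvEb p2 keypad w h r).length ≤ 4 := pvEb_length_le p2 keypad w h r
      have := ih F₁ (F₂ ++ pvEb p2 keypad w h r) (routes ++ pvHb p2 keypad w h r)
        (by simp at hle ⊢; omega)
      rw [this]
      simp [pvH, List.append_assoc]

theorem pvBres_nil (p2 : Int × Int) (keypad : List (List (Option String))) (w h : Int) :
    ∀ n, pvBres p2 keypad w h [] n = [] := by
  intro n
  induction n with
  | zero => rfl
  | succ n ih => simp [pvBres, pvH, pvE, ih]

-- ---- the min_length = None phase of A's while loop ----
theorem aLoop_none (p1 p2 : Int × Int) (keypad : List (List (Option String))) (w h : Int)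
    (wh : Nat) (hwh : wh = w.toNat * h.toNat) :
    ∀ (M fuel : Nat) (k : Nat) (F₁ F₂ : List (List (Int × Int))),
    5 * fuel + F₂.length ≤ M →
    pvFrontOK p1 w h k F₁ → pvFrontOK p1 w h (k + 1) F₂ →
    pvMu wh F₁ + pvMu wh F₂ ≤ fuel →
    aLoop p2 keypad w h fuel
        (F₁.map (fun r => (r, (k : Int))) ++ F₂.map (fun r => (r, (k : Int) + 1))) none []
      = if pvH p2 keypad w h F₁ ≠ [] then pvH p2 keypad w h F₁
        else pvBres p2 keypad w h (F₂ ++ pvE p2 keypad w h F₁) (wh - k) := by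
  intro M
  induction M with
  | zero =>
    intro fuel k F₁ F₂ hM hF1 hF2 hmu
    have hfuel : fuel = 0 := by omega
    subst hfuel
    have h1 : F₁ = [] := by
      cases F₁ with
      | nil => rfl
      | cons r F =>
        exfalso
        have : 1 * (r :: F).length ≤ pvMu wh (r :: F) :=
          pvMu_ge wh _ 1 (fun r _ => Nat.one_le_pow _ 5 (by norm_num))
        simp at this
        omega
    have h2 : F₂ = [] := by
      have : F₂.length = 0 := by omega
      exact List.length_eq_zero_iff.mp this
    subst h1; subst h2
    simp [aLoop, pvH, pvE, pvBres_nil]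
  | succ M ih =>
    intro fuel k F₁ F₂ hM hF1 hF2 hmu
    match F₁ with
    | [] =>
      match F₂ with
      | [] =>
        cases fuel <;> simp [aLoop, pvH, pvE, pvBres_nil]
      | r :: F₂' =>
        have hlen : r.length = (k + 1) + 1 := (hF2 r (by simp)).2
        have hbound : r.length ≤ wh + 1 := by
          rw [hwh]; exact pvRouteOK_length p1 w h r (hF2 r (by simp)).1
        have hk : k + 1 ≤ wh := by omega
        have hih := ih fuel (k + 1) (r :: F₂') []
          (by simp at hM ⊢; omega) hF2 (by intro r hr; simp at hr) (by simp [pvMu] at hmu ⊢; omega)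
        have hcast : ((k + 1 : Nat) : Int) = (k : Int) + 1 := by push_cast; ring
        rw [hcast] at hih
        simp only [List.map_nil, List.nil_append, List.append_nil] at hih ⊢
        rw [hih]
        have hsplit : wh - k = (wh - (k + 1)) + 1 := by omega
        rw [hsplit]
        simp [pvH, pvE, pvBres]
    | r :: F₁' =>
      have hgt : 1 ≤ fuel := by
        have : 1 * (r :: F₁').length ≤ pvMu wh (r :: F₁') :=
          pvMu_ge wh _ 1 (fun r _ => Nat.one_le_pow _ 5 (by norm_num))
        simp at this
        omega
      obtain ⟨fuel', rfl⟩ : ∃ f, fuel = f + 1 := ⟨fuel - 1, by omega⟩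
      have hrOK := (hF1 r (by simp)).1
      have hrlen : r.length = k + 1 := (hF1 r (by simp)).2
      have hrbound : r.length ≤ wh + 1 := by
        rw [hwh]; exact pvRouteOK_length p1 w h r hrOK
      have hk : k ≤ wh := by omega
      have hebmem : ∀ r' ∈ pvEb p2 keypad w h r,
          pvRouteOK p1 w h r' ∧ r'.length = (k + 1) + 1 := by
        intro r' hr'
        unfold pvEb at hr'
        obtain ⟨n, hn, rfl⟩ := List.mem_map.mp hr'
        have hn' := (List.mem_filter.mp hn).1
        refine ⟨pvRouteOK_child p1 keypad w h r n hrOK hn', by simp [hrlen]⟩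
      have hebF : pvFrontOK p1 w h (k + 1) (F₂ ++ pvEb p2 keypad w h r) := by
        intro r' hr'
        rcases List.mem_append.mp hr' with hr' | hr'
        · exact hF2 r' hr'
        · exact hebmem r' hr'
      have heblen := pvEb_length_le p2 keypad w h r
      have hA1 : (1 : Nat) ≤ 5 ^ (wh - k) := Nat.one_le_pow _ 5 (by norm_num)
      have hhead : 5 ^ (wh + 2 - r.length) = 5 * 5 ^ (wh - k) := by
        have : wh + 2 - r.length = (wh - k) + 1 := by omega
        rw [this, pow_succ]
        ring
      have hmuEb : pvMu wh (pvEb p2 keypad w h r) ≤ 5 ^ (wh - k) * 4 := by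
        refine le_trans (pvMu_le wh _ (5 ^ (wh - k)) ?_) ?_
        · intro r' hr'
          have : r'.length = (k + 1) + 1 := (hebmem r' hr').2
          have he : wh + 2 - r'.length = wh - k := by omega
          rw [he]
        · exact Nat.mul_le_mul_left _ heblen
      have hmucons : pvMu wh (r :: F₁') = 5 * 5 ^ (wh - k) + pvMu wh F₁' := by
        simp [pvMu] at hhead ⊢
        omega
      have hmuapp : pvMu wh (F₂ ++ pvEb p2 keypad w h r)
          = pvMu wh F₂ + pvMu wh (pvEb p2 keypad w h r) := by
        simp [pvMu]
      -- unfold one loop step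
      simp only [List.map_cons, List.cons_append, aLoop]
      rw [if_neg (by simp)]
      rw [procDirs_eq]
      have hq : (F₁'.map (fun r => (r, (k : Int))) ++ F₂.map (fun r => (r, (k : Int) + 1))) ++
          ((pvExtOf keypad w h r pvDIRECTIONS).filter (fun n => decide (¬n = p2))).map
            (fun n => (r ++ [n], (k : Int) + 1))
          = F₁'.map (fun r => (r, (k : Int))) ++
            (F₂ ++ pvEb p2 keypad w h r).map (fun r => (r, (k : Int) + 1)) := by
        rw [List.append_assoc, List.map_append]
        congr 1
        unfold pvEb
        rw [bExtensions_eq_extOf, List.map_map]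
        rfl
      have hhb : ((pvExtOf keypad w h r pvDIRECTIONS).filter (fun n => decide (n = p2))).map
          (fun n => r ++ [n]) = pvHb p2 keypad w h r := by
        unfold pvHb
        rw [bExtensions_eq_extOf]
      by_cases hh : ((pvExtOf keypad w h r pvDIRECTIONS).filter (fun n => decide (n = p2))) = []
      · -- no hit in this item: min_length stays None
        simp only [hq, hh, List.map_nil, List.append_nil]
        rw [if_neg (by simp)]
        have hih := ih fuel' k F₁' (F₂ ++ pvEb p2 keypad w h r)
          (by simp at hM ⊢; omega) (fun r' hr' => hF1 r' (by simp [hr'])) hebF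
          (by rw [hmuapp]; rw [hmucons] at hmu; omega)
        rw [hih]
        have hhbnil : pvHb p2 keypad w h r = [] := by rw [← hhb, hh]; rfl
        have hHcons : pvH p2 keypad w h (r :: F₁') = pvH p2 keypad w h F₁' := by
          simp [pvH, hhbnil]
        have hEcons : pvE p2 keypad w h (r :: F₁')
            = pvEb p2 keypad w h r ++ pvE p2 keypad w h F₁' := by
          simp [pvE]
        rw [hHcons, hEcons, List.append_assoc]
      · -- first hit: min_length becomes k+1, rest collected by aLoop_some
        have hhbne : pvHb p2 keypad w h r ≠ [] := by
          rw [← hhb]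
          simpa using hh
        simp only [hq, hhb, List.nil_append]
        rw [if_pos (by simp [hh])]
        have hfuelbound : 5 * F₁'.length + (F₂ ++ pvEb p2 keypad w h r).length ≤ fuel' := by
          have h5 : 5 * F₁'.length ≤ pvMu wh F₁' := by
            have := pvMu_ge wh F₁' 5 (fun r' hr' => by
              have hl : r'.length = k + 1 := (hF1 r' (by simp [hr'])).2
              have : wh + 2 - r'.length = (wh - k) + 1 := by omega
              rw [this, pow_succ]
              nlinarith)
            omega
          have h1 : F₂.length ≤ pvMu wh F₂ := by
            have := pvMu_ge wh F₂ 1 (fun r _ => Nat.one_le_pow _ 5 (by norm_num))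
            omega
          rw [hmucons] at hmu
          simp only [List.length_append]
          omega
        rw [aLoop_some p2 keypad w h (k : Int) fuel' F₁' (F₂ ++ pvEb p2 keypad w h r)
          (pvHb p2 keypad w h r) hfuelbound]
        have hHcons : pvH p2 keypad w h (r :: F₁')
            = pvHb p2 keypad w h r ++ pvH p2 keypad w h F₁' := by
          simp [pvH]
        rw [if_pos (by rw [hHcons]; simp [hhbne]), hHcons]

-- ---- B's iterative deepening equals the level semantics ----
theorem pvEpow_succ (p2 : Int × Int) (keypad : List (List (Option String))) (w h : Int) :
    ∀ (d : Nat) (F : List (List (Int × Int))),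
    pvE p2 keypad w h (pvEpow p2 keypad w h d F) = pvEpow p2 keypad w h (d + 1) F := by
  intro d
  induction d with
  | zero => intro F; rfl
  | succ d ih => intro F; exact ih (pvE p2 keypad w h F)

theorem dfs_level (p2 : Int × Int) (keypad : List (List (Option String))) (w h : Int) :
    ∀ (d : Nat) (F : List (List (Int × Int))),
    F.flatMap (fun r => bDfs p2 keypad w h r (d + 1)) = pvH p2 keypad w h (pvEpow p2 keypad w h d F) := by
  intro d
  induction d with
  | zero =>
    intro F
    simp only [pvEpow, pvH]
    congr 1
  | succ d ih =>
    intro F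
    have h1 : ∀ r : List (Int × Int), bDfs p2 keypad w h r (d + 2)
        = (pvEb p2 keypad w h r).flatMap (fun r' => bDfs p2 keypad w h r' (d + 1)) := by
      intro r
      rw [bDfs, pvEb, List.flatMap_map]
    have h2 : F.flatMap (fun r => bDfs p2 keypad w h r (d + 2))
        = (pvE p2 keypad w h F).flatMap (fun r => bDfs p2 keypad w h r (d + 1)) := by
      simp only [h1, pvE, List.flatMap_assoc]
    rw [h2, ih]
    rfl

theorem bTry_eq (p1 p2 : Int × Int) (keypad : List (List (Option String))) (w h : Int) :
    ∀ (n d : Nat),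
    bTry p1 p2 keypad w h n (d + 1) = pvBres p2 keypad w h (pvEpow p2 keypad w h d [[p1]]) n := by
  intro n
  induction n with
  | zero => intro d; rfl
  | succ n ih =>
    intro d
    rw [bTry, pvBres]
    have hfound : bDfs p2 keypad w h [p1] (d + 1)
        = pvH p2 keypad w h (pvEpow p2 keypad w h d [[p1]]) := by
      have := dfs_level p2 keypad w h d [[p1]]
      simpa using this
    rw [hfound, ih (d + 1), pvEpow_succ]

-- ===== VERDICT (by name: the statement is the Claim_ definition above) =====
theorem get_all_shortest_paths_spec : Claim_equal_get_all_shortest_paths := by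
  unfold Claim_equal_get_all_shortest_paths
  intro p1 p2 keypad _hdom _hpre
  unfold Spec_get_all_shortest_paths get_all_shortest_paths get_all_shortest_paths_alt
  by_cases hp : p1 = p2
  · simp [hp]
  · rw [if_neg hp, if_neg hp]
    dsimp only
    set a : Nat := (keypad.headD []).length with ha
    set b : Nat := keypad.length with hb
    have hwh : ((a : Int) * (b : Int)).toNat = a * b := by
      exact_mod_cast Int.toNat_natCast (a * b)
    have htn : (a : Int).toNat = a := Int.toNat_natCast a
    have htn' : (b : Int).toNat = b := Int.toNat_natCast b
    have hfront1 : pvFrontOK p1 (a : Int) (b : Int) 0 [[p1]] := by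
      intro r hr
      rw [List.mem_singleton] at hr
      subst hr
      exact ⟨⟨[], rfl, List.nodup_nil, by simp, by simp⟩, rfl⟩
    have hA := aLoop_none p1 p2 keypad (a : Int) (b : Int) (a * b) (by rw [htn, htn'])
      (5 * 5 ^ (a * b + 2)) (5 ^ (a * b + 2)) 0 [[p1]] []
      (by simp) hfront1 (by intro r hr; simp at hr)
      (by
        have : pvMu (a * b) [[p1]] = 5 ^ (a * b + 1) := by simp [pvMu]
        rw [this]
        exact Nat.pow_le_pow_right (by norm_num) (by omega))
    have hB := bTry_eq p1 p2 keypad (a : Int) (b : Int) (a * b + 1) 0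
    rw [hwh]
    have hq0 : ([([p1], (0 : Int))] : List (List (Int × Int) × Int))
        = [[p1]].map (fun r => (r, ((0 : Nat) : Int))) ++
          ([] : List (List (Int × Int))).map (fun r => (r, ((0 : Nat) : Int) + 1)) := by simp
    rw [hq0, hA, hB]
    simp only [pvEpow, Nat.sub_zero, List.nil_append]
    rw [pvBres]
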